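-- pv_equiv track=rewrite | github.com/Haksell/codeforces | problems/2050E.py | iterative
-- ===== SOURCE A (Python) =====
-- def iterative(a, b, c):
--     na = len(a) + 1
--     nb = len(b) + 1
--     dp = [[-1] * nb for _ in range(na)]
--     for ia in range(na):
--         dp[ia][-1] = sum(a[i] != c[i + len(b)] for i in range(ia, len(a)))
--     for ib in range(nb):
--         dp[-1][ib] = sum(b[i] != c[i + len(a)] for i in range(ib, len(b)))
--     for ia in range(na - 2, -1, -1):
--         for ib in range(nb - 2, -1, -1):
--             ra = dp[ia + 1][ib] + (a[ia] != c[ia + ib])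
--             rb = dp[ia][ib + 1] + (b[ib] != c[ia + ib])
--             dp[ia][ib] = min(ra, rb)
--     return dp[0][0]
-- ===== SOURCE B (Python) =====
-- def iterative(a, b, c):
--     # Anti-diagonal (wavefront) suffix DP keeping one diagonal at a time,
--     # instead of A's full (la+1)x(lb+1) table with precomputed base row/column.
--     la, lb = len(a), len(b)
--     nxt = [0]  # diagonal d = la + lb holds the single cell (la, lb) = 0
--     for d in range(la + lb - 1, -1, -1):
--         lo, hi = max(0, d - lb), min(la, d)
--         plo = max(0, d + 1 - lb)  # first ia of the previous (d+1) diagonal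
--         cur = []
--         for ia in range(lo, hi + 1):
--             ib = d - ia
--             best = None
--             if ia < la:
--                 best = nxt[ia + 1 - plo] + (a[ia] != c[d])
--             if ib < lb:
--                 rb = nxt[ia - plo] + (b[ib] != c[d])
--                 best = rb if best is None or rb < best else best
--             cur.append(best)
--         nxt = cur
--     return nxt[0]
-- ===== Notes on version B (the rewrite author's own statement) =====
-- stated objective: alternative
-- what changed: Replaces A's full (la+1)x(lb+1) backward table with precomputed suffix-sum base row/column by an anti-diagonal wavefront DP that keeps only one diagonal in memory and lets the base cases fall out of the recurrence.
import Mathlib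
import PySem

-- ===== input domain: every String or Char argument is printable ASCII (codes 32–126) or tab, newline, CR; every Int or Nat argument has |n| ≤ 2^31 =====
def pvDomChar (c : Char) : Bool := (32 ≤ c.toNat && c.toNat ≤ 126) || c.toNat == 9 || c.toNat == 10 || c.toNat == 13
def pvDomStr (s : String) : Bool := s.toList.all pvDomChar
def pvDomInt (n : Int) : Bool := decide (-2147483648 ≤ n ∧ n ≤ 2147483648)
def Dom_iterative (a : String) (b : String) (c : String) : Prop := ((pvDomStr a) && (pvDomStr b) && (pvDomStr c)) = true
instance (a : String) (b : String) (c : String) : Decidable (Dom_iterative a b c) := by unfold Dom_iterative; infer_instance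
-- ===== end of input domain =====

-- B replaces A's full (la+1)×(lb+1) backward table (with precomputed base row/column sums)
-- by an anti-diagonal wavefront that keeps only one diagonal in memory; same return value.

-- ===== PORT A =====
-- dp[ia][-1] = sum(a[i] != c[i+len(b)] for i in range(ia, len(a)))  (c-indices in range under Pre_)
def pA_sufA (ca cc : List Char) (lb ia : Nat) : Int :=
  if ia < ca.length then
    (if ca.getD ia ' ' ≠ cc.getD (ia + lb) ' ' then (1:Int) else 0) + pA_sufA ca cc lb (ia+1)
  else 0
termination_by ca.length - ia

-- dp[-1][ib] = sum(b[i] != c[i+len(a)] for i in range(ib, len(b)))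
def pA_sufB (cb cc : List Char) (la ib : Nat) : Int :=
  if ib < cb.length then
    (if cb.getD ib ' ' ≠ cc.getD (ib + la) ' ' then (1:Int) else 0) + pA_sufB cb cc la (ib+1)
  else 0
termination_by cb.length - ib

-- the inner loop 'for ib in range(nb-2,-1,-1)': row ia of dp, entries ib..lb,
-- built right to left from row ia+1 (`next`); entry lb is the base column value.
def pA_row (ca cb cc : List Char) (ia : Nat) (next : List Int) (ib : Nat) : List Int :=
  if ib < cb.length then
    let rest := pA_row ca cb cc ia next (ib+1)
    let ra := next.getD ib 0 + (if ca.getD ia ' ' ≠ cc.getD (ia+ib) ' ' then (1:Int) else 0)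
    let rb := rest.headD 0 + (if cb.getD ib ' ' ≠ cc.getD (ia+ib) ' ' then (1:Int) else 0)
    min ra rb :: rest
  else [pA_sufA ca cc cb.length ia]
termination_by cb.length - ib

-- the outer loop 'for ia in range(na-2,-1,-1)': rows bottom-up; row la is the base row.
def pA_rows (ca cb cc : List Char) (ia : Nat) : List Int :=
  if ia < ca.length then pA_row ca cb cc ia (pA_rows ca cb cc (ia+1)) 0
  else (List.range (cb.length+1)).map (pA_sufB cb cc ca.length)
termination_by ca.length - ia

def iterative (a : String) (b : String) (c : String) : Int :=
  (pA_rows a.toList b.toList c.toList 0).headD 0   -- dp[0][0]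

-- ===== PORT B =====
-- body of B's inner loop: one cell (ia, d-ia) of diagonal d, read from diagonal d+1 (`nxt`)
def pB_cell (ca cb cc : List Char) (d : Nat) (nxt : List Int) (plo ia : Nat) : Int :=
  let ib := d - ia
  let oA : Option Int :=
    if ia < ca.length then
      some (nxt.getD (ia+1-plo) 0 + (if ca.getD ia ' ' ≠ cc.getD d ' ' then (1:Int) else 0))
    else none
  if ib < cb.length then
    let rb := nxt.getD (ia-plo) 0 + (if cb.getD ib ' ' ≠ cc.getD d ' ' then (1:Int) else 0)
    match oA with
    | none => rb
    | some ra => if rb < ra then rb else ra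
  else oA.getD 0   -- unreachable default: one of the two moves always exists

-- 'for ia in range(lo, hi+1): cur.append(best)'
def pB_diagGo (ca cb cc : List Char) (d : Nat) (nxt : List Int) (plo hi ia : Nat) : List Int :=
  if ia ≤ hi then pB_cell ca cb cc d nxt plo ia :: pB_diagGo ca cb cc d nxt plo hi (ia+1)
  else []
termination_by hi+1-ia

-- 'for d in range(la+lb-1, -1, -1)': k diagonals processed, i.e. diagonal d = la+lb-k
def pB_diag (ca cb cc : List Char) : Nat → List Int
  | 0 => [0]
  | k+1 =>
    let nxt := pB_diag ca cb cc k
    let d := ca.length + cb.length - (k+1)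
    pB_diagGo ca cb cc d nxt (d+1-cb.length) (min ca.length d) (d - cb.length)

def iterative_alt (a : String) (b : String) (c : String) : Int :=
  (pB_diag a.toList b.toList c.toList (a.toList.length + b.toList.length)).getD 0 0   -- nxt[0]

-- ===== PRECONDITION & SPEC =====
-- Python A raises IndexError on c shorter than len(a)+len(b); exactly those inputs are excluded.
def Pre_iterative (a : String) (b : String) (c : String) : Prop :=
  a.length + b.length ≤ c.length
instance (a : String) (b : String) (c : String) : Decidable (Pre_iterative a b c) := by
  unfold Pre_iterative; infer_instance

def pvWitness_iterative : String × String × String := ("ab", "cd", "acbd")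

def Spec_iterative (a : String) (b : String) (c : String) (out : Int) : Prop := out = iterative_alt a b c
instance (a : String) (b : String) (c : String) (out : Int) : Decidable (Spec_iterative a b c out) := by
  unfold Spec_iterative; infer_instance

-- ===== CLAIM (what is proved, stated in full; the proofs are below) =====
def Claim_equal_iterative : Prop := ∀ (a : String) (b : String) (c : String), Dom_iterative a b c → Pre_iterative a b c → Spec_iterative a b c (iterative a b c)

-- ===== LEMMAS AND PROOFS =====

-- the common recurrence both tables compute: minimum mismatches placing a[ia:], b[ib:] into c[ia+ib:]
def pvGv (ca cb cc : List Char) (ia ib : Nat) : Int :=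
  if ia < ca.length then
    if ib < cb.length then
      min (pvGv ca cb cc (ia+1) ib + (if ca.getD ia ' ' ≠ cc.getD (ia+ib) ' ' then (1:Int) else 0))
          (pvGv ca cb cc ia (ib+1) + (if cb.getD ib ' ' ≠ cc.getD (ia+ib) ' ' then (1:Int) else 0))
    else (if ca.getD ia ' ' ≠ cc.getD (ia+ib) ' ' then (1:Int) else 0) + pvGv ca cb cc (ia+1) ib
  else if ib < cb.length then
    (if cb.getD ib ' ' ≠ cc.getD (ia+ib) ' ' then (1:Int) else 0) + pvGv ca cb cc ia (ib+1)
  else 0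
termination_by (ca.length - ia) + (cb.length - ib)

theorem pA_sufA_eq (ca cb cc : List Char) (ia : Nat) :
    pA_sufA ca cc cb.length ia = pvGv ca cb cc ia cb.length := by
  rw [pA_sufA, pvGv]
  by_cases h : ia < ca.length
  · rw [if_pos h, if_pos h, if_neg (lt_irrefl cb.length)]
    rw [pA_sufA_eq ca cb cc (ia+1)]
  · simp [h]
termination_by ca.length - ia

theorem pA_sufB_eq (ca cb cc : List Char) (ib : Nat) :
    pA_sufB cb cc ca.length ib = pvGv ca cb cc ca.length ib := by
  rw [pA_sufB, pvGv]
  by_cases h : ib < cb.length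
  · rw [if_pos h, if_neg (lt_irrefl ca.length), if_pos h]
    rw [pA_sufB_eq ca cb cc (ib+1), Nat.add_comm ib ca.length]
  · simp [h]
termination_by cb.length - ib

theorem pA_row_eq (ca cb cc : List Char) (ia : Nat) (next : List Int)
    (hnext : ∀ j, j ≤ cb.length → next.getD j 0 = pvGv ca cb cc (ia+1) j)
    (hia : ia < ca.length) (ib : Nat) (hib : ib ≤ cb.length) :
    pA_row ca cb cc ia next ib
      = (List.range' ib (cb.length+1-ib)).map (fun j => pvGv ca cb cc ia j) := by
  rw [pA_row]
  by_cases h : ib < cb.length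
  · simp only [if_pos h]
    have hrest := pA_row_eq ca cb cc ia next hnext hia (ib+1) h
    obtain ⟨n, hn⟩ : ∃ n, cb.length - ib = n + 1 := ⟨cb.length - ib - 1, by omega⟩
    have h1 : cb.length + 1 - (ib+1) = n + 1 := by omega
    have h2 : cb.length + 1 - ib = n + 2 := by omega
    rw [hrest, h1, h2]
    simp only [List.range']
    simp only [List.map_cons, List.headD_cons]
    congr 1
    rw [hnext ib (Nat.le_of_lt h)]
    conv_rhs => rw [pvGv]
    simp only [if_pos hia, if_pos h]
  · have he : ib = cb.length := by omega
    rw [if_neg h]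
    subst he
    have hcnt : cb.length + 1 - cb.length = 1 := by omega
    rw [hcnt]
    simp only [List.range', List.map_cons, List.map_nil]
    rw [pA_sufA_eq ca cb cc ia]
termination_by cb.length - ib

theorem pA_rows_eq (ca cb cc : List Char) (ia : Nat) (hia : ia ≤ ca.length) :
    pA_rows ca cb cc ia = (List.range (cb.length+1)).map (fun j => pvGv ca cb cc ia j) := by
  rw [pA_rows]
  by_cases h : ia < ca.length
  · simp only [if_pos h]
    have hIH := pA_rows_eq ca cb cc (ia+1) h
    have hnext : ∀ j, j ≤ cb.length →
        (pA_rows ca cb cc (ia+1)).getD j 0 = pvGv ca cb cc (ia+1) j := by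
      intro j hj
      rw [hIH, List.getD_eq_getElem?_getD]
      have hjlt : j < cb.length + 1 := by omega
      simp [hjlt]
    rw [pA_row_eq ca cb cc ia _ hnext h 0 (Nat.zero_le _)]
    simp [List.range_eq_range']
  · have he : ia = ca.length := by omega
    rw [if_neg h]
    subst he
    apply List.map_congr_left
    intro j _
    exact pA_sufB_eq ca cb cc j
termination_by ca.length - ia

theorem iterative_eq_pvGv (a b c : String) :
    iterative a b c = pvGv a.toList b.toList c.toList 0 0 := by
  unfold iterative
  rw [pA_rows_eq _ _ _ 0 (Nat.zero_le _)]
  simp [List.range_succ_eq_map]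

theorem pB_diagGo_eq (ca cb cc : List Char) (d : Nat) (nxt : List Int)
    (hd : d < ca.length + cb.length)
    (hnxt : nxt = (List.range' (d+1-cb.length) (min ca.length (d+1) + 1 - (d+1-cb.length))).map
        (fun i => pvGv ca cb cc i (d+1-i)))
    (ia : Nat) (hlo : d ≤ ia + cb.length) :
    pB_diagGo ca cb cc d nxt (d+1-cb.length) (min ca.length d) ia
      = (List.range' ia (min ca.length d + 1 - ia)).map (fun i => pvGv ca cb cc i (d-i)) := by
  rw [pB_diagGo]
  by_cases h : ia ≤ min ca.length d
  · simp only [if_pos h]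
    have hIH := pB_diagGo_eq ca cb cc d nxt hd hnxt (ia+1) (by omega)
    obtain ⟨n, hn⟩ : ∃ n, min ca.length d + 1 - ia = n + 1 := ⟨min ca.length d - ia, by omega⟩
    have h1 : min ca.length d + 1 - (ia+1) = n := by omega
    rw [hIH, h1, hn]
    simp only [List.range', List.map_cons]
    congr 1
    -- the cell equals pvGv ia (d-ia)
    have hiad : ia ≤ d := by omega
    have hibl : d - ia ≤ cb.length := by omega
    have hgetD : ∀ j, d+1-cb.length ≤ j → j ≤ min ca.length (d+1) →
        nxt.getD (j - (d+1-cb.length)) 0 = pvGv ca cb cc j (d+1-j) := by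
      intro j hj1 hj2
      rw [hnxt, List.getD_eq_getElem?_getD]
      have hlt : j - (d+1-cb.length) < min ca.length (d+1) + 1 - (d+1-cb.length) := by omega
      have hadd : (d+1-cb.length) + (j - (d+1-cb.length)) = j := by omega
      simp only [List.getElem?_map, List.getElem?_range', hlt, Option.map_some,
        Option.getD_some]
      simp [hadd]
    unfold pB_cell
    by_cases hA : ia < ca.length
    · by_cases hB : d - ia < cb.length
      · -- both moves available
        have hplo : d+1-cb.length ≤ ia := by omega
        have e1 : ia + 1 - (d+1-cb.length) = (ia+1) - (d+1-cb.length) := rfl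
        have g1 := hgetD (ia+1) (by omega) (by omega)
        have g2 := hgetD ia (by omega) (by omega)
        simp only [if_pos hA, if_pos hB]
        rw [g1, g2]
        have e2 : d + 1 - (ia+1) = d - ia := by omega
        have e3 : d + 1 - ia = (d - ia) + 1 := by omega
        rw [e2, e3]
        conv_rhs => rw [pvGv]
        simp only [if_pos hA, if_pos hB]
        have e4 : ia + (d - ia) = d := by omega
        rw [e4]
        rw [min_def]
        split_ifs <;> omega
      · -- only the a-move: ib = lb
        have hbl : d - ia = cb.length := by omega
        have hplo : d + 1 - cb.length = ia + 1 := by omega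
        simp only [if_pos hA, if_neg hB, Option.getD_some]
        have g1 := hgetD (ia+1) (by omega) (by omega)
        rw [hplo, Nat.sub_self] at g1
        rw [hplo, Nat.sub_self, g1]
        have e2 : d + 1 - (ia+1) = d - ia := by omega
        rw [e2]
        conv_rhs => rw [pvGv]
        simp only [if_pos hA, if_neg hB]
        have e4 : ia + (d - ia) = d := by omega
        rw [e4]
        ring
    · -- only the b-move: ia = la
      have hB : d - ia < cb.length := by omega
      have hplo : d+1-cb.length ≤ ia := by omega
      simp only [if_neg hA, if_pos hB]
      have g2 := hgetD ia (by omega) (by omega)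
      rw [g2]
      have e3 : d + 1 - ia = (d - ia) + 1 := by omega
      rw [e3]
      conv_rhs => rw [pvGv]
      simp only [if_neg hA, if_pos hB]
      have e4 : ia + (d - ia) = d := by omega
      rw [e4]
      ring
  · simp only [if_neg h]
    have : min ca.length d + 1 - ia = 0 := by omega
    rw [this]
    simp [List.range']
termination_by min ca.length d + 1 - ia

theorem pB_diag_eq (ca cb cc : List Char) (k : Nat) (hk : k ≤ ca.length + cb.length) :
    pB_diag ca cb cc k
      = (List.range' (ca.length + cb.length - k - cb.length)
            (min ca.length (ca.length + cb.length - k) + 1 - (ca.length + cb.length - k - cb.length))).map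
          (fun i => pvGv ca cb cc i (ca.length + cb.length - k - i)) := by
  induction k with
  | zero =>
    have e1 : ca.length + cb.length - 0 - cb.length = ca.length := by omega
    have e2 : min ca.length (ca.length + cb.length - 0) = ca.length := by omega
    rw [e1, e2]
    have e3 : ca.length + 1 - ca.length = 1 := by omega
    rw [e3]
    simp only [List.range', List.map_cons, List.map_nil]
    have e4 : ca.length + cb.length - 0 - ca.length = cb.length := by omega
    rw [e4]
    rw [pvGv]
    simp [pB_diag]
  | succ k ih =>
    have hk' : k ≤ ca.length + cb.length := by omega
    have ihk := ih hk'
    rw [pB_diag]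
    have hd1 : ca.length + cb.length - k = (ca.length + cb.length - (k+1)) + 1 := by omega
    rw [hd1] at ihk
    rw [pB_diagGo_eq ca cb cc (ca.length + cb.length - (k+1)) _ (by omega) ihk
        (ca.length + cb.length - (k+1) - cb.length) (by omega)]

theorem iterative_alt_eq_pvGv (a b c : String) :
    iterative_alt a b c = pvGv a.toList b.toList c.toList 0 0 := by
  unfold iterative_alt
  rw [pB_diag_eq _ _ _ _ (Nat.le_refl _)]
  have e1 : a.toList.length + b.toList.length - (a.toList.length + b.toList.length) = 0 := by omega
  rw [e1]
  simp

-- ===== VERDICT (by name: the statement is the Claim_ definition above) =====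
theorem iterative_spec : Claim_equal_iterative := by
  intro a b c _ _
  unfold Spec_iterative
  rw [iterative_eq_pvGv, iterative_alt_eq_pvGv]
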